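-- pv_equiv track=rewrite | github.com/SincereLi16/AI-Suifengtingdi | generate_rag/generate_rag_lineup_chess_pool.py | _merge_recommended_equips
-- ===== SOURCE A (Python) =====
-- from typing import Any, DefaultDict, Dict, List, Optional, Set, Tuple
--
-- RECOMMENDED_EQUIP_CAP = 6
--
-- def _merge_recommended_equips(
--     name: str,
--     top_eq: List[Tuple[str, int]],
--     supplement: Dict[str, List[str]],
--     cap: int = RECOMMENDED_EQUIP_CAP,
-- ) -> List[str]:
--     """人工表优先，再用攻略聚合补到至多 cap 件（去重）。"""
--     seen: Set[str] = set()
--     merged: List[str] = []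
--     for e in supplement.get(name, []):
--         e = str(e).strip()
--         if e and e not in seen:
--             seen.add(e)
--             merged.append(e)
--         if len(merged) >= cap:
--             return merged
--     for e, _ in top_eq:
--         e = str(e).strip()
--         if e and e not in seen:
--             seen.add(e)
--             merged.append(e)
--         if len(merged) >= cap:
--             break
--     return merged
-- ===== SOURCE B (Python) =====
-- RECOMMENDED_EQUIP_CAP = 6
--
-- def _merge_recommended_equips(name, top_eq, supplement, cap=RECOMMENDED_EQUIP_CAP):
--     """Manual table first, then guide aggregation, deduplicated, at most cap items."""
--     cand = list(supplement.get(name, [])) + [e for e, _ in top_eq]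
--     out = []
--     while cand:
--         head = str(cand[0]).strip()
--         cand = [x for x in cand[1:] if str(x).strip() != head]
--         if head:
--             out.append(head)
--     return out[:cap] if cap > 0 else []
-- ===== Notes on version B (the rewrite author's own statement) =====
-- stated objective: alternative
-- what changed: B replaces A's seen-set single pass with per-item cap checks by a nub-by-deletion loop: it repeatedly takes the head of the combined candidate list, removes every later candidate with the same stripped value, collects non-empty heads, and finally slices [:cap]; no set and no cap bookkeeping inside the loop.
-- intended difference: When cap <= 0 and the first candidate name strips to a non-empty string, A returns that one item (it appends before checking the cap), while B returns [], the intended result for a non-positive cap. — e.g. on _merge_recommended_equips("n", [("x", 1)], [], 0): A returns ["x"], B returns []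
import Mathlib
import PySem

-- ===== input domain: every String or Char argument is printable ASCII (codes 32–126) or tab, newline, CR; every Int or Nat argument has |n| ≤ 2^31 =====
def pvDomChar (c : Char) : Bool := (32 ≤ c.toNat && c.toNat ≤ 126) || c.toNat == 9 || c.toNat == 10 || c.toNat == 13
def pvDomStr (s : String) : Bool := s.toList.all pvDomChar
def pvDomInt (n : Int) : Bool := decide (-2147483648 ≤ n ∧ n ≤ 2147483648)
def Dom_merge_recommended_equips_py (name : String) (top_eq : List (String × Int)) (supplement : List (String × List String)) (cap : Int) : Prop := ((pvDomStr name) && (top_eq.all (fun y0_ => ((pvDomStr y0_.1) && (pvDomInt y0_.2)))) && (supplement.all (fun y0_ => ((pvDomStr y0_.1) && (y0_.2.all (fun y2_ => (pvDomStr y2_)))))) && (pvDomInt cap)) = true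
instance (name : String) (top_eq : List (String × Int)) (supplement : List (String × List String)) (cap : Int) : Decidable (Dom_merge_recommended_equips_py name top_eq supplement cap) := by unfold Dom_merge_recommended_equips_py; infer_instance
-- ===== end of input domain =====

-- B (alternative): dedups by repeatedly deleting later duplicates of the current head from the
-- candidate list (no seen-set, no per-item cap checks), then slices [:cap]; for cap ≤ 0 B returns []
-- where A can return one item (intended difference, see D_ below).

-- ===== PORT A =====
-- Python A: first loop over supplement.get(name, []), then over top_eq, with a seen-set,
-- appending stripped non-empty unseen names and returning/breaking once len(merged) >= cap.
def mreLoop1 (cap : Int) : List String → PySem.Set String → List String → (List String) ⊕ (PySem.Set String × List String)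
  | [], seen, merged => .inr (seen, merged)
  | e :: rest, seen, merged =>
      let e' := PySem.Str.strip e
      let sm := if e' ≠ "" ∧ ¬ PySem.Set.contains seen e' then
                  (PySem.Set.add seen e', merged ++ [e'])
                else (seen, merged)
      if cap ≤ (sm.2.length : Int) then .inl sm.2 else mreLoop1 cap rest sm.1 sm.2

def mreLoop2 (cap : Int) : List (String × Int) → PySem.Set String → List String → List String
  | [], _, merged => merged
  | p :: rest, seen, merged =>
      let e' := PySem.Str.strip p.1
      let sm := if e' ≠ "" ∧ ¬ PySem.Set.contains seen e' then
                  (PySem.Set.add seen e', merged ++ [e'])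
                else (seen, merged)
      if cap ≤ (sm.2.length : Int) then sm.2 else mreLoop2 cap rest sm.1 sm.2

def merge_recommended_equips_py (name : String) (top_eq : List (String × Int)) (supplement : List (String × List String)) (cap : Int) : List String :=
  match mreLoop1 cap (PySem.Dict.getD (PySem.Dict.mk supplement) name []) PySem.Set.empty [] with
  | .inl merged => merged
  | .inr (seen, merged) => mreLoop2 cap top_eq seen merged

-- ===== PORT B =====
-- Python B's while loop: state (cand, out); each round strips the head, removes all later
-- candidates with the same stripped value (cand[1:] filtered), appends non-empty heads.
def uniqLoop : List String → List String → List String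
  | [], out => out
  | x :: r, out =>
      let h := PySem.Str.strip x
      let cand' := r.filter (fun y => PySem.Str.strip y ≠ h)
      if h ≠ "" then uniqLoop cand' (out ++ [h]) else uniqLoop cand' out
termination_by cand _ => cand.length
decreasing_by
  all_goals
    simp only [List.length_unattach, List.length_cons]
    exact Nat.lt_succ_of_le (le_trans (List.length_filter_le _ _) (by simp))

def merge_recommended_equips_py_alt (name : String) (top_eq : List (String × Int)) (supplement : List (String × List String)) (cap : Int) : List String :=
  let cand := PySem.Dict.getD (PySem.Dict.mk supplement) name [] ++ top_eq.map (fun p => p.1)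
  if 0 < cap then PySem.List.slice (uniqLoop cand []) none (some cap) else []

-- ===== PRECONDITION & SPEC =====
-- When cap ≤ 0 and the first candidate name strips to a non-empty string, A returns that one item
-- (it appends before checking the cap), while B returns [], the intended result for a non-positive cap.
def D_merge_recommended_equips_py (name : String) (top_eq : List (String × Int)) (supplement : List (String × List String)) (cap : Int) : Prop :=
  cap ≤ 0 ∧ PySem.Str.strip ((PySem.Dict.getD (PySem.Dict.mk supplement) name [] ++ top_eq.map Prod.fst).headD "") ≠ ""
instance (name : String) (top_eq : List (String × Int)) (supplement : List (String × List String)) (cap : Int) : Decidable (D_merge_recommended_equips_py name top_eq supplement cap) := by unfold D_merge_recommended_equips_py; infer_instance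

def Spec_merge_recommended_equips_py (name : String) (top_eq : List (String × Int)) (supplement : List (String × List String)) (cap : Int) (out : List String) : Prop := ¬ D_merge_recommended_equips_py name top_eq supplement cap → out = merge_recommended_equips_py_alt name top_eq supplement cap
instance (name : String) (top_eq : List (String × Int)) (supplement : List (String × List String)) (cap : Int) (out : List String) : Decidable (Spec_merge_recommended_equips_py name top_eq supplement cap out) := by unfold Spec_merge_recommended_equips_py; infer_instance

def pvDiffWitness_merge_recommended_equips_py : String × (List (String × Int)) × (List (String × List String)) × Int := ("n", [("x", 1)], [], 0)
def pvDiffWitnessOut_merge_recommended_equips_py : (List String) × (List String) := (["x"], [])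

-- ===== CLAIM (what is proved, stated in full; the proofs are below) =====
def Claim_unchanged_merge_recommended_equips_py : Prop := ∀ (name : String) (top_eq : List (String × Int)) (supplement : List (String × List String)) (cap : Int), Dom_merge_recommended_equips_py name top_eq supplement cap → Spec_merge_recommended_equips_py name top_eq supplement cap (merge_recommended_equips_py name top_eq supplement cap)
def Claim_changed_merge_recommended_equips_py : Prop := Dom_merge_recommended_equips_py (pvDiffWitness_merge_recommended_equips_py.1) (pvDiffWitness_merge_recommended_equips_py.2.1) (pvDiffWitness_merge_recommended_equips_py.2.2.1) (pvDiffWitness_merge_recommended_equips_py.2.2.2) ∧ D_merge_recommended_equips_py (pvDiffWitness_merge_recommended_equips_py.1) (pvDiffWitness_merge_recommended_equips_py.2.1) (pvDiffWitness_merge_recommended_equips_py.2.2.1) (pvDiffWitness_merge_recommended_equips_py.2.2.2) ∧ merge_recommended_equips_py (pvDiffWitness_merge_recommended_equips_py.1) (pvDiffWitness_merge_recommended_equips_py.2.1) (pvDiffWitness_merge_recommended_equips_py.2.2.1) (pvDiffWitness_merge_recommended_equips_py.2.2.2) = pvDiffWitnessOut_merge_recommended_equips_py.1 ∧ merge_recommended_equips_py_alt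 (pvDiffWitness_merge_recommended_equips_py.1) (pvDiffWitness_merge_recommended_equips_py.2.1) (pvDiffWitness_merge_recommended_equips_py.2.2.1) (pvDiffWitness_merge_recommended_equips_py.2.2.2) = pvDiffWitnessOut_merge_recommended_equips_py.2 ∧ pvDiffWitnessOut_merge_recommended_equips_py.1 ≠ pvDiffWitnessOut_merge_recommended_equips_py.2
def Claim_exact_merge_recommended_equips_py : Prop := ∀ (name : String) (top_eq : List (String × Int)) (supplement : List (String × List String)) (cap : Int), Dom_merge_recommended_equips_py name top_eq supplement cap → D_merge_recommended_equips_py name top_eq supplement cap → merge_recommended_equips_py name top_eq supplement cap ≠ merge_recommended_equips_py_alt name top_eq supplement cap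

-- ===== LEMMAS AND PROOFS =====
-- ordered collector: stripped, non-empty, not-yet-collected names (against accumulator 'prior')
def ddv : List String → List String → List String
  | [], _ => []
  | e :: r, prior =>
      let e' := PySem.Str.strip e
      if e' ≠ "" ∧ e' ∉ prior then e' :: ddv r (prior ++ [e']) else ddv r prior

lemma mreLoop2_eq (cap : Int) (tops : List (String × Int)) : ∀ (seen : PySem.Set String) (merged : List String),
    (merged.length : Int) < cap →
    (∀ x, PySem.Set.contains seen x = true ↔ x ∈ merged) →
    mreLoop2 cap tops seen merged = merged ++ (ddv (tops.map Prod.fst) merged).take (cap - merged.length).toNat := by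
  induction tops with
  | nil => intro seen merged hlen hinv; simp [mreLoop2, ddv]
  | cons p r ih =>
    intro seen merged hlen hinv
    by_cases hcond : PySem.Str.strip p.1 ≠ "" ∧ ¬ PySem.Set.contains seen (PySem.Str.strip p.1)
    · have hmem : PySem.Str.strip p.1 ∉ merged := by
        rw [← hinv]; simpa using hcond.2
      have hinv' : ∀ x, PySem.Set.contains (PySem.Set.add seen (PySem.Str.strip p.1)) x = true ↔ x ∈ merged ++ [PySem.Str.strip p.1] := by
        intro x
        rw [PySem.Set.contains_iff, PySem.Set.mem_add]
        simp [← hinv x]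
      by_cases hfull : cap ≤ ((merged ++ [PySem.Str.strip p.1]).length : Int)
      · have hk : (cap - merged.length).toNat = 1 := by simp at hfull; omega
        simp only [mreLoop2, ddv, List.map_cons]
        rw [if_pos hcond, if_pos (by simpa using hfull)]
        rw [if_pos ⟨hcond.1, hmem⟩, hk]
        simp
      · have hlen' : ((merged ++ [PySem.Str.strip p.1]).length : Int) < cap := by
          simp at hfull ⊢; omega
        have hk : (cap - merged.length).toNat = ((cap - (merged.length + 1)).toNat) + 1 := by
          simp at hfull; omega
        simp only [mreLoop2, ddv, List.map_cons]
        rw [if_pos hcond, if_neg (by simpa using hfull)]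
        rw [ih _ _ hlen' hinv']
        rw [if_pos ⟨hcond.1, hmem⟩, hk]
        simp [List.take_succ_cons]
    · have hskip : ¬ (PySem.Str.strip p.1 ≠ "" ∧ PySem.Str.strip p.1 ∉ merged) := by
        intro ⟨h1, h2⟩
        exact hcond ⟨h1, by rw [hinv]; exact h2⟩
      simp only [mreLoop2, ddv, List.map_cons]
      rw [if_neg hcond]
      simp only
      rw [if_neg (by exact not_le.mpr hlen), ih _ _ hlen hinv]
      rw [if_neg hskip]

lemma mre_run_eq (cap : Int) (es : List String) (tops : List (String × Int)) :
    ∀ (seen : PySem.Set String) (merged : List String),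
    (merged.length : Int) < cap →
    (∀ x, PySem.Set.contains seen x = true ↔ x ∈ merged) →
    (match mreLoop1 cap es seen merged with
     | .inl m => m
     | .inr (s, m) => mreLoop2 cap tops s m)
    = merged ++ (ddv (es ++ tops.map Prod.fst) merged).take (cap - merged.length).toNat := by
  induction es with
  | nil =>
    intro seen merged hlen hinv
    simp only [mreLoop1, List.nil_append]
    exact mreLoop2_eq cap tops seen merged hlen hinv
  | cons e r ih =>
    intro seen merged hlen hinv
    by_cases hcond : PySem.Str.strip e ≠ "" ∧ ¬ PySem.Set.contains seen (PySem.Str.strip e)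
    · have hmem : PySem.Str.strip e ∉ merged := by
        rw [← hinv]; simpa using hcond.2
      have hinv' : ∀ x, PySem.Set.contains (PySem.Set.add seen (PySem.Str.strip e)) x = true ↔ x ∈ merged ++ [PySem.Str.strip e] := by
        intro x
        rw [PySem.Set.contains_iff, PySem.Set.mem_add]
        simp [← hinv x]
      by_cases hfull : cap ≤ ((merged ++ [PySem.Str.strip e]).length : Int)
      · have hk : (cap - merged.length).toNat = 1 := by simp at hfull; omega
        simp only [mreLoop1, List.cons_append, ddv]
        rw [if_pos hcond, if_pos (by simpa using hfull)]
        rw [if_pos ⟨hcond.1, hmem⟩, hk]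
        simp
      · have hlen' : ((merged ++ [PySem.Str.strip e]).length : Int) < cap := by
          simp at hfull ⊢; omega
        have hk : (cap - merged.length).toNat = ((cap - (merged.length + 1)).toNat) + 1 := by
          simp at hfull; omega
        simp only [mreLoop1, List.cons_append, ddv]
        rw [if_pos hcond, if_neg (by simpa using hfull)]
        rw [ih _ _ hlen' hinv']
        rw [if_pos ⟨hcond.1, hmem⟩, hk]
        simp [List.take_succ_cons]
    · have hskip : ¬ (PySem.Str.strip e ≠ "" ∧ PySem.Str.strip e ∉ merged) := by
        intro ⟨h1, h2⟩
        exact hcond ⟨h1, by rw [hinv]; exact h2⟩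
      simp only [mreLoop1, List.cons_append, ddv]
      rw [if_neg hcond]
      simp only
      rw [if_neg (by exact not_le.mpr hlen), ih _ _ hlen hinv]
      rw [if_neg hskip]

-- uniqLoop ignores candidates that strip to the empty string
lemma uniqLoop_filter_empty (n : ℕ) : ∀ (l out : List String), l.length ≤ n →
    uniqLoop (l.filter (fun y => PySem.Str.strip y ≠ "")) out = uniqLoop l out := by
  induction n with
  | zero =>
    intro l out hl
    have : l = [] := List.eq_nil_of_length_eq_zero (Nat.le_zero.mp hl)
    simp [this]
  | succ n ih =>
    intro l out hl
    cases l with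
    | nil => simp
    | cons x r =>
      simp only [List.length_cons, Nat.succ_le_succ_iff] at hl
      by_cases hx : PySem.Str.strip x = ""
      · rw [List.filter_cons_of_neg (by simp [hx])]
        conv_rhs => rw [uniqLoop]
        rw [if_neg (by simpa using hx)]
        have : r.filter (fun y => PySem.Str.strip y ≠ PySem.Str.strip x) = r.filter (fun y => PySem.Str.strip y ≠ "") := by
          apply List.filter_congr; intro y _; simp [hx]
        rw [this]
      · rw [List.filter_cons_of_pos (by simpa using hx)]
        conv_lhs => rw [uniqLoop]
        conv_rhs => rw [uniqLoop]
        rw [if_pos (by simpa using hx), if_pos (by simpa using hx)]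
        rw [List.filter_filter]
        have : (fun y => decide (PySem.Str.strip y ≠ PySem.Str.strip x) && decide (PySem.Str.strip y ≠ "")) = (fun y => (fun z => PySem.Str.strip z ≠ "") y && (fun z => PySem.Str.strip z ≠ PySem.Str.strip x) y) := by
          funext y; simp [Bool.and_comm]
        rw [this, ← List.filter_filter]
        exact ih _ _ (le_trans (List.length_filter_le _ _) hl)

lemma uniqLoop_eq_ddv (n : ℕ) : ∀ (xs prior out : List String), xs.length ≤ n → "" ∉ prior →
    uniqLoop (xs.filter (fun y => PySem.Str.strip y ∉ prior)) out = out ++ ddv xs prior := by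
  induction n with
  | zero =>
    intro xs prior out hl _
    have : xs = [] := List.eq_nil_of_length_eq_zero (Nat.le_zero.mp hl)
    simp [this, ddv, uniqLoop]
  | succ n ih =>
    intro xs prior out hl hpr
    cases xs with
    | nil => simp [ddv, uniqLoop]
    | cons x r =>
      simp only [List.length_cons, Nat.succ_le_succ_iff] at hl
      by_cases hmem : PySem.Str.strip x ∈ prior
      · have hx : PySem.Str.strip x ≠ "" := fun h => hpr (h ▸ hmem)
        rw [List.filter_cons_of_neg (by simpa using hmem)]
        rw [ih r prior out hl hpr]
        simp only [ddv]
        rw [if_neg (by simp [hmem])]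
      · rw [List.filter_cons_of_pos (by simpa using hmem)]
        by_cases hx : PySem.Str.strip x = ""
        · conv_lhs => rw [uniqLoop]
          rw [if_neg (by simpa using hx)]
          rw [List.filter_filter]
          have hfe : (fun y => decide (PySem.Str.strip y ≠ PySem.Str.strip x) && decide (PySem.Str.strip y ∉ prior)) = (fun y => (fun z => PySem.Str.strip z ≠ "") y && (fun z => PySem.Str.strip z ∉ prior) y) := by
            funext y; simp [hx]
          rw [hfe, ← List.filter_filter]
          rw [uniqLoop_filter_empty (r.filter (fun y => PySem.Str.strip y ∉ prior)).length _ _ le_rfl]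
          rw [ih r prior out hl hpr]
          simp only [ddv]
          rw [if_neg (by simp [hx])]
        · conv_lhs => rw [uniqLoop]
          rw [if_pos (by simpa using hx)]
          rw [List.filter_filter]
          have hfe : (fun y => decide (PySem.Str.strip y ≠ PySem.Str.strip x) && decide (PySem.Str.strip y ∉ prior)) = fun y => decide (PySem.Str.strip y ∉ prior ++ [PySem.Str.strip x]) := by
            funext y
            by_cases h1 : PySem.Str.strip y = PySem.Str.strip x <;>
              by_cases h2 : PySem.Str.strip y ∈ prior <;>
              simp [List.mem_append, h1, h2]
          rw [hfe]
          have hpr' : "" ∉ prior ++ [PySem.Str.strip x] := by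
            intro hm
            rcases List.mem_append.mp hm with h | h
            · exact hpr h
            · simp only [List.mem_singleton] at h
              exact hx h.symm
          rw [ih r (prior ++ [PySem.Str.strip x]) (out ++ [PySem.Str.strip x]) hl hpr']
          simp only [ddv]
          rw [if_pos ⟨hx, hmem⟩]
          simp

lemma uniqLoop_nil_eq_ddv (xs : List String) : uniqLoop xs [] = ddv xs [] := by
  have h := uniqLoop_eq_ddv xs.length xs [] [] le_rfl (by simp)
  simpa using h

-- ===== VERDICT (by name: the statement is the Claim_ definition above) =====
theorem merge_recommended_equips_py_spec : Claim_unchanged_merge_recommended_equips_py := by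
  intro name tops sup cap hdom
  unfold Spec_merge_recommended_equips_py
  intro hnD
  by_cases hc : cap ≤ 0
  · have hhead : PySem.Str.strip ((PySem.Dict.getD (PySem.Dict.mk sup) name [] ++ tops.map Prod.fst).headD "") = "" := by
      by_contra h
      exact hnD ⟨hc, h⟩
    have hB : merge_recommended_equips_py_alt name tops sup cap = [] := by
      simp [merge_recommended_equips_py_alt, show ¬ (0 < cap) from not_lt.mpr hc]
    rw [hB]
    unfold merge_recommended_equips_py
    cases hL : PySem.Dict.getD (PySem.Dict.mk sup) name [] with
    | cons e r =>
      rw [hL] at hhead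
      simp only [List.cons_append, List.headD_cons] at hhead
      simp [mreLoop1, hhead, hc]
    | nil =>
      rw [hL] at hhead
      simp only [List.nil_append] at hhead
      cases tops with
      | nil => simp [mreLoop1, mreLoop2]
      | cons p r =>
        simp only [List.map_cons, List.headD_cons] at hhead
        simp [mreLoop1, mreLoop2, hhead, hc]
  · have hlen : ((([] : List String)).length : Int) < cap := by simp; omega
    have hinv : ∀ x : String, PySem.Set.contains PySem.Set.empty x = true ↔ x ∈ ([] : List String) := by
      simp [PySem.Set.empty]
    have hA := mre_run_eq cap (PySem.Dict.getD (PySem.Dict.mk sup) name []) tops PySem.Set.empty [] hlen hinv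
    unfold merge_recommended_equips_py
    rw [hA]
    simp only [List.nil_append, List.length_nil, Nat.cast_zero, sub_zero]
    have hmap : tops.map (fun p : String × Int => p.1) = tops.map Prod.fst := rfl
    simp only [merge_recommended_equips_py_alt, show (0 : Int) < cap from by omega, if_true, hmap]
    rw [PySem.List.slice_to _ (by omega : (0 : Int) ≤ cap)]
    rw [uniqLoop_nil_eq_ddv]

theorem merge_recommended_equips_py_changed : Claim_changed_merge_recommended_equips_py := by
  unfold Claim_changed_merge_recommended_equips_py; decide

theorem merge_recommended_equips_py_tight : Claim_exact_merge_recommended_equips_py := by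
  intro name tops sup cap hdom hD
  obtain ⟨hc, hhead⟩ := hD
  have hB : merge_recommended_equips_py_alt name tops sup cap = [] := by
    simp [merge_recommended_equips_py_alt, show ¬ (0 < cap) from not_lt.mpr hc]
  rw [hB]
  unfold merge_recommended_equips_py
  cases hL : PySem.Dict.getD (PySem.Dict.mk sup) name [] with
  | cons e r =>
    rw [hL] at hhead
    simp only [List.cons_append, List.headD_cons] at hhead
    simp [mreLoop1, hhead, PySem.Set.empty, show cap ≤ (1 : Int) from by omega]
  | nil =>
    rw [hL] at hhead
    simp only [List.nil_append] at hhead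
    cases tops with
    | nil => exact absurd (by decide) hhead
    | cons p r =>
      simp only [List.map_cons, List.headD_cons] at hhead
      simp [mreLoop1, mreLoop2, hhead, PySem.Set.empty, show cap ≤ (1 : Int) from by omega]
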